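-- pv_equiv track=rewrite | github.com/dangthe05/Code-by-Dangthe | Project-game/python_chess/python_chess.py | is_king_alive
-- ===== SOURCE A (Python) =====
-- def is_king_alive(board):
--     white_king = False
--     black_king = False
--
--     for row in board:
--         for piece in row:
--             if piece == "white_king":
--                 white_king = True
--             elif piece == "black_king":
--                 black_king = True
--
--     return white_king, black_king
-- ===== SOURCE B (Python) =====
-- def is_king_alive(board):
--     def found(target):
--         return any(any(piece == target for piece in row) for row in board)
--     return found("white_king"), found("black_king")
-- ===== Notes on version B (the rewrite author's own statement) =====
-- stated objective: simpler
-- what changed: B replaces A's single pass that threads two boolean flags through nested loops with two independent short-circuiting searches (any/any), one per king, each stopping at the first hit.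
import Mathlib
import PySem

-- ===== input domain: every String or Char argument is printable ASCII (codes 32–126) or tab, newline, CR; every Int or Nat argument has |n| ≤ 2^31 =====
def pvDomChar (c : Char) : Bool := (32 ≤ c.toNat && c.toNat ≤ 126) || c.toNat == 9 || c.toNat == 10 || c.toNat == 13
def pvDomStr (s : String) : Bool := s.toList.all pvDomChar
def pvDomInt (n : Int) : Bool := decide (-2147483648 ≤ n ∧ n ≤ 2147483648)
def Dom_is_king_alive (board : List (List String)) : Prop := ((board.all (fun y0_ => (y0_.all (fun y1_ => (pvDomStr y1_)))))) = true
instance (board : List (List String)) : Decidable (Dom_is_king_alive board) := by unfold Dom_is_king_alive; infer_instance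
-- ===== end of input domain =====

-- B replaces A's single two-flag nested scan with two independent short-circuiting searches (any/any), one per king (objective: simpler). Same return value everywhere.


-- ===== PORT A =====
def is_king_alive (board : List (List String)) : Bool × Bool :=
  let st := board.foldl (fun st row =>
    row.foldl (fun st piece =>
      if piece = "white_king" then (true, st.2)
      else if piece = "black_king" then (st.1, true)
      else st) st) (false, false)
  (st.1, st.2)

-- ===== PORT B =====
def pvFound (board : List (List String)) (target : String) : Bool :=
  board.any (fun row => row.any (fun piece => piece == target))

def is_king_alive_alt (board : List (List String)) : Bool × Bool :=
  (pvFound board "white_king", pvFound board "black_king")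

-- ===== PRECONDITION & SPEC =====
def Spec_is_king_alive (board : List (List String)) (out : Bool × Bool) : Prop := out = is_king_alive_alt board
instance (board : List (List String)) (out : Bool × Bool) : Decidable (Spec_is_king_alive board out) := by unfold Spec_is_king_alive; infer_instance

-- ===== CLAIM (what is proved, stated in full; the proofs are below) =====
def Claim_equal_is_king_alive : Prop := ∀ (board : List (List String)), Dom_is_king_alive board → Spec_is_king_alive board (is_king_alive board)

-- ===== LEMMAS AND PROOFS =====

-- A's inner fold sets each flag iff the corresponding king occurs in the row
theorem inner_fold (row : List String) (st : Bool × Bool) :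
    row.foldl (fun st piece =>
      if piece = "white_king" then (true, st.2)
      else if piece = "black_king" then (st.1, true)
      else st) st
    = (st.1 || row.any (fun p => p == "white_king"),
       st.2 || row.any (fun p => p == "black_king")) := by
  induction row generalizing st with
  | nil => simp
  | cons p r ih =>
    simp only [List.foldl_cons, ih, List.any_cons]
    have hw' : ((p == "white_king") = true) = (p = "white_king") := by simp
    have hb' : ((p == "black_king") = true) = (p = "black_king") := by simp
    by_cases hw : p = "white_king" <;> by_cases hb : p = "black_king" <;>
      simp [hw, hb, hw', hb', beq_false_of_ne, Bool.or_assoc]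

-- A's outer fold sets each flag iff some row contains the corresponding king
theorem outer_fold (board : List (List String)) (st : Bool × Bool) :
    board.foldl (fun st row =>
      row.foldl (fun st piece =>
        if piece = "white_king" then (true, st.2)
        else if piece = "black_king" then (st.1, true)
        else st) st) st
    = (st.1 || pvFound board "white_king", st.2 || pvFound board "black_king") := by
  induction board generalizing st with
  | nil => simp [pvFound]
  | cons r b ih =>
    rw [List.foldl_cons, inner_fold, ih]
    simp [pvFound, Bool.or_assoc]

-- ===== VERDICT (by name: the statement is the Claim_ definition above) =====
theorem is_king_alive_spec : Claim_equal_is_king_alive := by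
  intro board _
  unfold Spec_is_king_alive is_king_alive is_king_alive_alt
  simp only [outer_fold, Bool.false_or]
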